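-- pv_equiv track=rewrite | github.com/anthonykish/EECE590X | libs/fsm/fsm_timing_from_state_table.py | _fallback_to_dotless
-- ===== SOURCE A (Python) =====
-- def _fallback_to_dotless(dotted: str) -> str:
--     dotless = ""
--     last = "0"
--     seen = False
--     for ch in dotted:
--         if ch == ".":
--             if not seen:
--                 raise ValueError("dotted waveform cannot start with '.'")
--             dotless += last
--         else:
--             dotless += ch
--             last = ch
--             seen = True
--     return dotless
-- ===== SOURCE B (Python) =====
-- def _fallback_to_dotless(dotted: str) -> str:
--     if dotted.startswith("."):
--         raise ValueError("dotted waveform cannot start with '.'")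
--     out = []
--     i = 0
--     n = len(dotted)
--     while i < n:
--         ch = dotted[i]
--         j = i + 1
--         while j < n and dotted[j] == ".":
--             j += 1
--         out.append(ch * (j - i))
--         i = j
--     return "".join(out)
-- ===== Notes on version B (the rewrite author's own statement) =====
-- stated objective: alternative
-- what changed: B replaces A's char-by-char scan with stateful string concatenation (last/seen flags) by a run-based pass: after one leading-dot guard it finds each non-dot anchor with its run of trailing dots and emits anchor*(run+1) at once, joined at the end.
import Mathlib
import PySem

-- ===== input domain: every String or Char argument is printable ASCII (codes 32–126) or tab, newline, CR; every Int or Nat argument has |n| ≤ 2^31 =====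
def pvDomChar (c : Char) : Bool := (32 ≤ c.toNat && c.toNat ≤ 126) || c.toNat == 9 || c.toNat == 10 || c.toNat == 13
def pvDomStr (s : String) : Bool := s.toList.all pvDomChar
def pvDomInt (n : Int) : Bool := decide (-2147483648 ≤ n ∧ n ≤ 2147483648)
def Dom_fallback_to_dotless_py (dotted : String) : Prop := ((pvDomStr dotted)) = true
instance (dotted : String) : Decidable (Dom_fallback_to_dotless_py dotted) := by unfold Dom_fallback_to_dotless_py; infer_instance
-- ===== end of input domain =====

-- B replaces A's char-by-char stateful scan by a run-based pass (each non-dot anchor and its run of dots emitted as one block); equal on all inputs where A returns (no leading dot).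

-- ===== PORT A =====
-- A's loop over the characters with state (dotless, last, seen); the branch where
-- Python raises ValueError (a dot before any non-dot char) is unreachable under Pre_.
def fbALoop : List Char → List Char → Char → Bool → List Char
  | [], dotless, _, _ => dotless
  | ch :: rest, dotless, last, seen =>
    if ch = '.' then
      if !seen then dotless  -- Python raises ValueError here; excluded by Pre_
      else fbALoop rest (dotless ++ [last]) last seen
    else fbALoop rest (dotless ++ [ch]) ch true

def fallback_to_dotless_py (dotted : String) : String :=
  String.mk (fbALoop dotted.toList [] '0' false)

-- ===== PORT B =====
-- inner while loop of Source B: consume the run of dots after an anchor, returning (run length, remainder)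
def fbBDots : List Char → Nat × List Char
  | [] => (0, [])
  | c :: rest => if c = '.' then ((fbBDots rest).1 + 1, (fbBDots rest).2) else (0, c :: rest)

theorem fbBDots_len (l : List Char) : (fbBDots l).2.length ≤ l.length := by
  induction l with
  | nil => simp [fbBDots]
  | cons c rest ih =>
    simp only [fbBDots]
    split
    · exact Nat.le_succ_of_le ih
    · simp

-- outer while loop of Source B: anchor char, then its dot run, emitted as one replicated block
def fbBLoop : List Char → List Char
  | [] => []
  | ch :: rest =>
    List.replicate ((fbBDots rest).1 + 1) ch ++ fbBLoop (fbBDots rest).2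
termination_by l => l.length
decreasing_by exact Nat.lt_succ_of_le (fbBDots_len rest)

def fallback_to_dotless_py_alt (dotted : String) : String :=
  if dotted.toList.head? = some '.' then ""  -- Source B raises ValueError here; excluded by Pre_
  else String.mk (fbBLoop dotted.toList)

-- ===== PRECONDITION & SPEC =====
-- Pre_ excludes exactly the inputs on which Python A raises ValueError: a waveform starting with '.'.
def Pre_fallback_to_dotless_py (dotted : String) : Prop := dotted.toList.head? ≠ some '.'
instance (dotted : String) : Decidable (Pre_fallback_to_dotless_py dotted) := by unfold Pre_fallback_to_dotless_py; infer_instance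

def pvWitness_fallback_to_dotless_py : String := "ab..c."

def Spec_fallback_to_dotless_py (dotted : String) (out : String) : Prop := out = fallback_to_dotless_py_alt dotted
instance (dotted : String) (out : String) : Decidable (Spec_fallback_to_dotless_py dotted out) := by unfold Spec_fallback_to_dotless_py; infer_instance

-- ===== CLAIM (what is proved, stated in full; the proofs are below) =====
def Claim_equal_fallback_to_dotless_py : Prop := ∀ (dotted : String), Dom_fallback_to_dotless_py dotted → Pre_fallback_to_dotless_py dotted → Spec_fallback_to_dotless_py dotted (fallback_to_dotless_py dotted)

-- ===== LEMMAS AND PROOFS =====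

-- simple recursive characterisation of the expansion, bridging the two loop shapes
def expand : List Char → Char → List Char
  | [], _ => []
  | ch :: rest, last => if ch = '.' then last :: expand rest last else ch :: expand rest ch

theorem fbALoop_seen (l : List Char) : ∀ (acc : List Char) (last : Char),
    fbALoop l acc last true = acc ++ expand l last := by
  induction l with
  | nil => intro acc last; simp [fbALoop, expand]
  | cons ch rest ih =>
    intro acc last
    by_cases h : ch = '.'
    · simp [fbALoop, expand, h, ih]
    · simp [fbALoop, expand, h, ih]

theorem expand_eq_fbB (l : List Char) (last : Char) :
    expand l last = List.replicate (fbBDots l).1 last ++ fbBLoop (fbBDots l).2 := by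
  induction l generalizing last with
  | nil => simp [expand, fbBDots, fbBLoop]
  | cons ch rest ih =>
    by_cases h : ch = '.'
    · subst h
      simp only [expand, fbBDots, ih]
      simp [List.replicate_succ]
    · simp only [expand, if_neg h, fbBDots, List.replicate_zero, List.nil_append]
      rw [fbBLoop]
      simp [ih, List.replicate_succ]

theorem fbBLoop_cons (ch : Char) (rest : List Char) :
    fbBLoop (ch :: rest) = ch :: expand rest ch := by
  rw [fbBLoop, expand_eq_fbB]
  simp [List.replicate_succ]

-- ===== VERDICT (by name: the statement is the Claim_ definition above) =====
theorem fallback_to_dotless_py_spec : Claim_equal_fallback_to_dotless_py := by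
  intro dotted _ hpre
  unfold Spec_fallback_to_dotless_py fallback_to_dotless_py fallback_to_dotless_py_alt
  unfold Pre_fallback_to_dotless_py at hpre
  rw [if_neg hpre]
  cases hl : dotted.toList with
  | nil => rw [fbBLoop]; simp [fbALoop]
  | cons ch rest =>
    have hch : ch ≠ '.' := by
      intro h; subst h; rw [hl] at hpre; simp at hpre
    rw [fbBLoop_cons]
    simp [fbALoop, hch, fbALoop_seen]
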